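-- pv_equiv track=rewrite | github.com/WenZhang-Vivien/Tree_construction_Primal_Dual_Routing | Tree_construction_Primal_Dual/Tree_combination_Primal_Dual.py | tree_dfs
-- ===== SOURCE A (Python) =====
-- def tree_dfs(graph, start):
--     tree_nodes = []
--     visited = set([start])
--     total_distance = 0
--
--     # stack entries: (node, iterator over neighbors)
--     stack = [(start, iter(graph.get(start, [])))]
--     tree_nodes.append(start)
--
--     while stack:
--         node, it = stack[-1]
--         try:
--             neighbor, weight = next(it)
--         except StopIteration:
--             stack.pop()
--             continue
--
--         if neighbor in visited:
--             continue
--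
--         visited.add(neighbor)
--         tree_nodes.append(neighbor)
--         total_distance += weight
--
--         stack.append((neighbor, iter(graph.get(neighbor, []))))
--
--     return tree_nodes, total_distance
-- ===== SOURCE B (Python) =====
-- def tree_dfs(graph, start):
--     tree_nodes = [start]
--     visited = {start}
--     total_distance = 0
--
--     def dfs(node):
--         nonlocal total_distance
--         for neighbor, weight in graph.get(node, []):
--             if neighbor not in visited:
--                 visited.add(neighbor)
--                 tree_nodes.append(neighbor)
--                 total_distance += weight
--                 dfs(neighbor)
--
--     dfs(start)
--     return tree_nodes, total_distance
-- ===== Notes on version B (the rewrite author's own statement) =====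
-- stated objective: simpler
-- what changed: Replaced A's explicit stack of (node, live iterator) frames with StopIteration handling by a plain recursive DFS helper that loops over each adjacency list and recurses into unvisited neighbors, preserving the same preorder and edge-weight sum.
import Mathlib
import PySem

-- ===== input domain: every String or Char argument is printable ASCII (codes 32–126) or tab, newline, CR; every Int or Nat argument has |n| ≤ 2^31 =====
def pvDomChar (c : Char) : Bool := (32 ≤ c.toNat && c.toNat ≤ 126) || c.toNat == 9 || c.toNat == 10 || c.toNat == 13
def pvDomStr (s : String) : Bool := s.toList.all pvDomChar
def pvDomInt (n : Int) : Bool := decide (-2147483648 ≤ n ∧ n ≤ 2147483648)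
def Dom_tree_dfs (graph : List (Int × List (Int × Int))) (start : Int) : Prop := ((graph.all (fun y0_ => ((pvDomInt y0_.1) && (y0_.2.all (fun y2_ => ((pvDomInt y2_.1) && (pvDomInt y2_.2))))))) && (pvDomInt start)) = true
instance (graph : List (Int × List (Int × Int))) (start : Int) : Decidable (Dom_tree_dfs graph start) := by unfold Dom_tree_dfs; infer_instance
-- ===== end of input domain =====

-- B replaces A's explicit stack of (node, live iterator) frames by a plain recursive
-- DFS helper (simpler); same preorder node list and edge-weight sum.

-- graph.get(node, [])
def pvGet (graph : List (Int × List (Int × Int))) (n : Int) : List (Int × Int) :=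
  PySem.Dict.getD (PySem.Dict.mk graph) n []

-- ===== termination measure (used by both ports' `decreasing_by`) =====
def pvW (v : PySem.Set Int) (p : Int × List (Int × Int)) : Nat :=
  if p.1 ∈ v then 0 else 2 * p.2.length + 2

def pvPot (graph : List (Int × List (Int × Int))) (v : PySem.Set Int) : Nat :=
  (graph.map (pvW v)).sum

def pvSW (stack : List (Int × List (Int × Int))) : Nat :=
  (stack.map (fun f => 1 + 2 * f.2.length)).sum

theorem pvW_mono {v v' : PySem.Set Int} (h : ∀ x ∈ v, x ∈ v')
    (p : Int × List (Int × Int)) : pvW v' p ≤ pvW v p := by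
  by_cases hm : p.1 ∈ v
  · simp [pvW, hm, h _ hm]
  · simp only [pvW, hm, if_false]
    split <;> omega

theorem pvPot_mono (graph : List (Int × List (Int × Int))) {v v' : PySem.Set Int}
    (h : ∀ x ∈ v, x ∈ v') : pvPot graph v' ≤ pvPot graph v :=
  List.sum_le_sum (fun p _ => pvW_mono h p)

theorem pvNotMem_of_contains_false {v : PySem.Set Int} {nb : Int}
    (h : PySem.Set.contains v nb = false) : nb ∉ v := by
  simp only [PySem.Set.contains, List.contains_eq_mem, decide_eq_false_iff_not] at h
  exact h

theorem pvSet_add_eq {v : PySem.Set Int} {nb : Int} (h : PySem.Set.contains v nb = false) :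
    PySem.Set.add v nb = v ++ [nb] := by
  have hm := pvNotMem_of_contains_false h
  simp [PySem.Set.add, PySem.Set.contains_eq_listContains, hm]

theorem pvPot_add (graph : List (Int × List (Int × Int))) {v : PySem.Set Int} {nb : Int}
    (hnb : nb ∉ v) :
    pvPot graph (v ++ [nb]) + 2 * (pvGet graph nb).length ≤ pvPot graph v := by
  have hsub : ∀ x ∈ v, x ∈ v ++ [nb] := fun x hx => by simp [hx]
  induction graph with
  | nil => simp [pvPot, pvGet, PySem.Dict.getD, PySem.Dict.get?]
  | cons p gs ih =>
    obtain ⟨k, adj⟩ := p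
    by_cases hk : k = nb
    · have hget : pvGet ((k, adj) :: gs) nb = adj := by
        simp [pvGet, PySem.Dict.getD, PySem.Dict.get?_mk_cons, hk]
      have h1 : pvW (v ++ [nb]) (k, adj) = 0 := by simp [pvW, hk]
      have h2 : pvW v (k, adj) = 2 * adj.length + 2 := by simp [pvW, hk, hnb]
      have h3 : pvPot gs (v ++ [nb]) ≤ pvPot gs v := pvPot_mono gs hsub
      simp only [pvPot] at ih h3
      simp only [pvPot, List.map_cons, List.sum_cons, hget, h1, h2]
      omega
    · have hget : pvGet ((k, adj) :: gs) nb = pvGet gs nb := by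
        simp [pvGet, PySem.Dict.getD, PySem.Dict.get?_mk_cons, hk]
      have h1 : pvW (v ++ [nb]) (k, adj) ≤ pvW v (k, adj) := pvW_mono hsub (k, adj)
      simp only [pvPot] at ih
      simp only [pvPot, List.map_cons, List.sum_cons, hget]
      omega

-- small arithmetic lemmas cited by the ports' `decreasing_by` (named so the
-- embedded termination proofs stay small)
theorem pvSW_cons (f : Int × List (Int × Int)) (rest : List (Int × List (Int × Int))) :
    pvSW (f :: rest) = 1 + 2 * f.2.length + pvSW rest := rfl

theorem pvLtA (p s l : Nat) : p + s < p + (1 + 2 * l + s) := by omega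

theorem pvLtB (p l s : Nat) : p + (1 + 2 * l + s) < p + (1 + 2 * (l + 1) + s) := by omega

theorem pvLtC (a2 a g l s p : Nat) (he : a2 = a) (h1 : a + 2 * g ≤ p) :
    a2 + (1 + 2 * g + (1 + 2 * l + s)) < p + (1 + 2 * (l + 1) + s) := by omega

theorem pvLtD (p l : Nat) : p + 2 * l < p + 2 * (l + 1) := by omega

theorem pvLtE (a2 a g p l : Nat) (he : a2 = a) (h1 : a + 2 * g ≤ p) :
    a2 + 2 * g < p + 2 * (l + 1) := by omega

theorem pvLtF (r a2 a g p l : Nat) (h2 : r ≤ a2) (he : a2 = a) (h1 : a + 2 * g ≤ p) :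
    r + 2 * l < p + 2 * (l + 1) := by omega

theorem pvContainsFalse {v : PySem.Set Int} {nb : Int} (h : ¬ v.contains nb = true) :
    PySem.Set.contains v nb = false := by
  cases hx : PySem.Set.contains v nb
  · rfl
  · exact absurd hx h

-- ===== PORT A =====
-- A's while loop over the stack of (node, iterator) frames, state = (visited, tree_nodes, total_distance);
-- the head of `stack` is the top frame, a frame's list is the iterator's remaining elements.
def pvRunA (graph : List (Int × List (Int × Int))) :
    List (Int × List (Int × Int)) → PySem.Set Int × List Int × Int →
    PySem.Set Int × List Int × Int
  | [], st => st
  | (n, it) :: rest, st =>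
    match it with
    | [] => pvRunA graph rest st                                -- StopIteration: stack.pop()
    | (nb, w) :: it' =>
      if PySem.Set.contains st.1 nb then
        pvRunA graph ((n, it') :: rest) st                      -- neighbor in visited: continue
      else
        pvRunA graph ((nb, pvGet graph nb) :: (n, it') :: rest)
          (PySem.Set.add st.1 nb, st.2.1 ++ [nb], st.2.2 + w)
termination_by stack st => pvPot graph st.1 + pvSW stack
decreasing_by
  · rw [pvSW_cons]
    exact pvLtA _ _ _
  · rw [pvSW_cons, pvSW_cons]
    simp only [List.length_cons]
    exact pvLtB _ _ _
  · rename_i h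
    have hc : PySem.Set.contains st.1 nb = false := pvContainsFalse h
    have h1 := pvPot_add graph (pvNotMem_of_contains_false hc)
    have he := congrArg (pvPot graph) (pvSet_add_eq hc)
    rw [pvSW_cons, pvSW_cons, pvSW_cons]
    simp only [List.length_cons]
    exact pvLtC _ _ _ _ _ _ he h1

def tree_dfs (graph : List (Int × List (Int × Int))) (start : Int) : List Int × Int :=
  let st := pvRunA graph [(start, pvGet graph start)] (PySem.Set.ofList [start], [start], 0)
  (st.2.1, st.2.2)

-- ===== PORT B =====
-- B's recursive helper dfs: the for-loop over graph.get(node, []) is the recursion on `adj`,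
-- the recursive call dfs(neighbor) is the nested call on pvGet graph nb.  The result carries
-- the proof that `visited` only grows (needed for termination of the nested recursion).
def pvDfs (graph : List (Int × List (Int × Int))) :
    (adj : List (Int × Int)) → (st : PySem.Set Int × List Int × Int) →
    {st' : PySem.Set Int × List Int × Int // ∀ x ∈ st.1, x ∈ st'.1}
  | [], st => ⟨st, fun _ hx => hx⟩
  | (nb, w) :: es, st =>
    if h : PySem.Set.contains st.1 nb = true then
      pvDfs graph es st                                          -- neighbor in visited: skip
    else
      let st₂ : PySem.Set Int × List Int × Int :=
        (PySem.Set.add st.1 nb, st.2.1 ++ [nb], st.2.2 + w)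
      let r₁ := pvDfs graph (pvGet graph nb) st₂                 -- dfs(neighbor)
      let r₂ := pvDfs graph es r₁.val                            -- rest of the for-loop
      ⟨r₂.val, fun x hx => r₂.property x (r₁.property x (by
        simp only [st₂, PySem.Set.mem_add]; exact Or.inl hx))⟩
termination_by adj st => pvPot graph st.1 + 2 * adj.length
decreasing_by
  · simp only [List.length_cons]
    exact pvLtD _ _
  · have hc : PySem.Set.contains st.1 nb = false := pvContainsFalse h
    have h1 := pvPot_add graph (pvNotMem_of_contains_false hc)
    have he := congrArg (pvPot graph) (pvSet_add_eq hc)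
    simp only [List.length_cons]
    exact pvLtE _ _ _ _ _ he h1
  · have hc : PySem.Set.contains st.1 nb = false := pvContainsFalse h
    have h1 := pvPot_add graph (pvNotMem_of_contains_false hc)
    have h2 : pvPot graph r₁.val.1 ≤ pvPot graph st₂.1 :=
      pvPot_mono graph r₁.property
    have he := congrArg (pvPot graph) (pvSet_add_eq hc)
    simp only [List.length_cons]
    exact pvLtF _ _ _ _ _ _ h2 he h1

def tree_dfs_alt (graph : List (Int × List (Int × Int))) (start : Int) : List Int × Int :=
  let st := (pvDfs graph (pvGet graph start) (PySem.Set.ofList [start], [start], 0)).val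
  (st.2.1, st.2.2)

-- ===== PRECONDITION & SPEC =====
def Spec_tree_dfs (graph : List (Int × List (Int × Int))) (start : Int) (out : List Int × Int) : Prop := out = tree_dfs_alt graph start
instance (graph : List (Int × List (Int × Int))) (start : Int) (out : List Int × Int) : Decidable (Spec_tree_dfs graph start out) := by unfold Spec_tree_dfs; infer_instance

-- ===== CLAIM (what is proved, stated in full; the proofs are below) =====
def Claim_equal_tree_dfs : Prop := ∀ (graph : List (Int × List (Int × Int))) (start : Int), Dom_tree_dfs graph start → Spec_tree_dfs graph start (tree_dfs graph start)

-- ===== LEMMAS AND PROOFS =====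

-- simulation: running A's loop with a top frame (n, adj) first exhausts that frame,
-- computing exactly B's dfs over adj, then continues with the remaining frames.
-- (induction on a bound N of the termination measure)
theorem pvRunA_eq_pvDfs (graph : List (Int × List (Int × Int))) :
    ∀ (N : Nat) (adj : List (Int × Int)) (st : PySem.Set Int × List Int × Int),
      pvPot graph st.1 + 2 * adj.length ≤ N →
      ∀ (n : Int) (rest : List (Int × List (Int × Int))),
        pvRunA graph ((n, adj) :: rest) st = pvRunA graph rest (pvDfs graph adj st).val := by
  intro N
  induction N with
  | zero =>
    intro adj st hm n rest
    match adj with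
    | [] => simp [pvRunA, pvDfs]
    | _ :: _ => simp only [List.length_cons] at hm; omega
  | succ N ih =>
    intro adj st hm n rest
    match adj with
    | [] => simp [pvRunA, pvDfs]
    | (nb, w) :: es =>
      simp only [List.length_cons] at hm
      rw [pvRunA, pvDfs.eq_def]
      by_cases h : PySem.Set.contains st.1 nb = true
      · simp only [h, if_true]
        exact ih es st (by omega) n rest
      · have hc : PySem.Set.contains st.1 nb = false := by simpa using h
        have h1 := pvPot_add graph (pvNotMem_of_contains_false hc)
        have hadd : PySem.Set.add st.1 nb = st.1 ++ [nb] := pvSet_add_eq hc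
        simp only [hc, if_false, Bool.false_eq_true]
        have b1 : pvPot graph (PySem.Set.add st.1 nb, st.2.1 ++ [nb], st.2.2 + w).1
            + 2 * (pvGet graph nb).length ≤ N := by
          simp only [hadd]; omega
        rw [ih (pvGet graph nb) _ b1 nb ((n, es) :: rest)]
        have b2 : pvPot graph (pvDfs graph (pvGet graph nb)
              (PySem.Set.add st.1 nb, st.2.1 ++ [nb], st.2.2 + w)).val.1 + 2 * es.length ≤ N := by
          have h2 : pvPot graph (pvDfs graph (pvGet graph nb)
                (PySem.Set.add st.1 nb, st.2.1 ++ [nb], st.2.2 + w)).val.1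
              ≤ pvPot graph (PySem.Set.add st.1 nb, st.2.1 ++ [nb], st.2.2 + w).1 :=
            pvPot_mono graph (pvDfs graph (pvGet graph nb)
              (PySem.Set.add st.1 nb, st.2.1 ++ [nb], st.2.2 + w)).property
          simp only [hadd] at h2
          omega
        rw [ih es _ b2 n rest]
        simp

-- ===== VERDICT (by name: the statement is the Claim_ definition above) =====
theorem tree_dfs_spec : Claim_equal_tree_dfs := by
  intro graph start _
  unfold Spec_tree_dfs tree_dfs tree_dfs_alt
  rw [pvRunA_eq_pvDfs graph
    (pvPot graph (PySem.Set.ofList [start]) + 2 * (pvGet graph start).length) _ _ (le_refl _)]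
  simp [pvRunA]
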